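-- pv_equiv track=rewrite | github.com/kabbagepatch/AdventOfCode2025 | day10/not_mine.py | make_bcombos
-- ===== SOURCE A (Python) =====
-- from itertools import combinations
-- from typing import List, Set, Dict, Tuple
--
-- def make_bcombos(bsets: List[Set[int]], machine_count: int) -> Dict[Tuple[int], Tuple[int, int]]:
--     # Note: because of the insertion order
--     #  can assume that outp[x][0] >= outp[y][0] iff x > y
--     bcombos = {}
--     # This includes pressing no buttons as a combination:
--     #  easy way to halve the problem during iteration
--     for clen in range(len(bsets) + 1):
--         for bcombo in combinations(range(len(bsets)), clen):
--             joltage = tuple(sum(int(i in bsets[bn]) for bn in bcombo) for i in range(machine_count))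
--             if joltage not in bcombos:
--                 bcombos[joltage] = (clen, bitmask(joltage))
--     return bcombos
--
-- def bitmask(joltage: Tuple[int]) -> int:
--     return sum((j % 2) << i for i, j in enumerate(joltage))
-- ===== SOURCE B (Python) =====
-- def make_bcombos(bsets, machine_count):
--     # Layered prefix-sharing generation: layer k holds, for every size-k button
--     # combination (same lexicographic order as itertools.combinations), its
--     # accumulated joltage vector together with the list of button columns still
--     # available after its last chosen button.  Each joltage is built by one
--     # vector addition instead of being recomputed from scratch per combination.
--     cols = [[1 if i in s else 0 for i in range(machine_count)] for s in bsets]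
--     bcombos = {}
--     layer = [(cols, [0 for _ in range(machine_count)])]
--     for clen in range(len(bsets) + 1):
--         for rest, jolt in layer:
--             if tuple(jolt) not in bcombos:
--                 mask = 0
--                 for j in reversed(jolt):
--                     mask = 2 * mask + j % 2
--                 bcombos[tuple(jolt)] = (clen, mask)
--         layer = [(rest[idx + 1:], [x + y for x, y in zip(jolt, rest[idx])])
--                  for rest, jolt in layer for idx in range(len(rest))]
--     return bcombos
-- ===== Notes on version B (the rewrite author's own statement) =====
-- stated objective: faster
-- what changed: Instead of recomputing each joltage vector from scratch with per-index set-membership scans for every one of the 2^n combinations, B grows combinations layer by layer (size k -> k+1), carrying each partial combination's accumulated joltage vector and its remaining column suffix, so every new joltage costs one vector addition; precomputed 0/1 columns replace the repeated set-membership tests.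
import Mathlib
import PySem

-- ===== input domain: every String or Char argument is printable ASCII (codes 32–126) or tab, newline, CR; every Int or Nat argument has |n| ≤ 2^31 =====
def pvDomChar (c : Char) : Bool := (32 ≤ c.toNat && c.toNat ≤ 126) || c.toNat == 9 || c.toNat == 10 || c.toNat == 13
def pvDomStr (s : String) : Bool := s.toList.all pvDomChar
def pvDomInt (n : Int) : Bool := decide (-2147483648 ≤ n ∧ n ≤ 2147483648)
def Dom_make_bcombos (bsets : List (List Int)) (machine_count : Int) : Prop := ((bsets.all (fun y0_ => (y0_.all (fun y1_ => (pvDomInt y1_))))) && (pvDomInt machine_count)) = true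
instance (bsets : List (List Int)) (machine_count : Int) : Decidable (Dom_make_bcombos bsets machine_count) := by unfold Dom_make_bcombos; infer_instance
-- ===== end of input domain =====

-- B replaces A's per-combination joltage recomputation (set-membership scan per machine per button)
-- by layered generation that extends each size-k combination's accumulated joltage vector with one
-- vector addition over precomputed 0/1 columns; measured faster (objective: faster).


-- ===== PORT A =====
-- bitmask(joltage) = sum((j % 2) << i for i, j in enumerate(joltage))
def bitmask (joltage : List Int) : Int :=
  ((PySem.List.enumerate joltage).map (fun p => (PySem.Int.mod p.2 2) <<< p.1.toNat)).sum

-- joltage = tuple(sum(int(i in bsets[bn]) for bn in bcombo) for i in range(machine_count))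
-- (bn comes from range(len(bsets)), so bsets[bn] never raises; pyGetD's default is never used)
def joltageA (bsets : List (List Int)) (machine_count : Int) (bcombo : List Int) : List Int :=
  (PySem.List.pyRange 0 machine_count 1).map (fun i =>
    (bcombo.map (fun bn => if i ∈ PySem.List.pyGetD bsets bn [] then (1 : Int) else 0)).sum)

def make_bcombos (bsets : List (List Int)) (machine_count : Int) : List (List Int × Int × Int) :=
  let d := (List.range (bsets.length + 1)).foldl (fun d clen =>
    (PySem.List.combinations (PySem.List.pyRange 0 (bsets.length : Int) 1) clen).foldl (fun d bcombo =>
      let joltage := joltageA bsets machine_count bcombo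
      if !(d.contains joltage) then d.insert joltage ((clen : Int), bitmask joltage) else d)
      d) PySem.Dict.empty
  d.items

-- ===== PORT B =====
-- [x + y for x, y in zip(a, b)]
def addVec (a b : List Int) : List Int := (a.zip b).map (fun p => p.1 + p.2)

-- mask = 0; for j in reversed(jolt): mask = 2 * mask + j % 2
def maskB (jolt : List Int) : Int :=
  jolt.reverse.foldl (fun m j => 2 * m + PySem.Int.mod j 2) 0

-- the inner 'for idx in range(len(rest))' of the layer comprehension, structurally:
-- item idx is (rest[idx + 1:], addVec jolt rest[idx]); rest[idx+1:] is the suffix after rest[idx]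
def extendRow (jolt : List Int) : List (List Int) → List (List (List Int) × List Int)
  | [] => []
  | col :: rest => (rest, addVec jolt col) :: extendRow jolt rest

def make_bcombos_alt (bsets : List (List Int)) (machine_count : Int) : List (List Int × Int × Int) :=
  let cols := bsets.map (fun s =>
    (PySem.List.pyRange 0 machine_count 1).map (fun i => if i ∈ s then (1 : Int) else 0))
  let zero := (PySem.List.pyRange 0 machine_count 1).map (fun _ => (0 : Int))
  let st := (List.range (bsets.length + 1)).foldl
    (fun (st : PySem.Dict (List Int) (Int × Int) × List (List (List Int) × List Int)) clen =>
      let d := st.2.foldl (fun d item =>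
        if !(d.contains item.2) then d.insert item.2 ((clen : Int), maskB item.2) else d) st.1
      let layer := st.2.flatMap (fun item => extendRow item.2 item.1)
      (d, layer))
    (PySem.Dict.empty, [(cols, zero)])
  st.1.items

-- ===== PRECONDITION & SPEC =====
def Spec_make_bcombos (bsets : List (List Int)) (machine_count : Int) (out : List (List Int × Int × Int)) : Prop := out = make_bcombos_alt bsets machine_count
instance (bsets : List (List Int)) (machine_count : Int) (out : List (List Int × Int × Int)) : Decidable (Spec_make_bcombos bsets machine_count out) := by unfold Spec_make_bcombos; infer_instance

-- ===== CLAIM (what is proved, stated in full; the proofs are below) =====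
def Claim_equal_make_bcombos : Prop := ∀ (bsets : List (List Int)) (machine_count : Int), Dom_make_bcombos bsets machine_count → Spec_make_bcombos bsets machine_count (make_bcombos bsets machine_count)

-- ===== LEMMAS AND PROOFS =====

-- combinations together with the remaining suffix of the source list after the last chosen element
def combosR : List Int → Nat → List (List Int × List Int)
  | l, 0 => [([], l)]
  | [], _ + 1 => []
  | x :: xs, k + 1 =>
      (combosR xs k).map (fun p => (x :: p.1, p.2)) ++ combosR xs (k + 1)

-- all one-element extensions of combination c into its remaining suffix
def extPairs (c : List Int) : List Int → List (List Int × List Int)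
  | [] => []
  | b :: r => (c ++ [b], r) :: extPairs c r

theorem combosR_fst : ∀ (l : List Int) (k : Nat),
    (combosR l k).map Prod.fst = PySem.List.combinations l k := by
  intro l
  induction l with
  | nil => intro k; cases k <;> simp [combosR, PySem.List.combinations_zero, PySem.List.combinations_nil_succ]
  | cons x xs ih =>
    intro k
    cases k with
    | zero => simp [combosR, PySem.List.combinations_zero]
    | succ k =>
      simp [combosR, PySem.List.combinations_cons_succ, ← ih, List.map_map]

theorem extPairs_cons (x : Int) (c : List Int) : ∀ r : List Int,
    extPairs (x :: c) r = (extPairs c r).map (fun p => (x :: p.1, p.2)) := by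
  intro r
  induction r with
  | nil => rfl
  | cons b r ih => simp [extPairs, ih]

theorem combosR_succ : ∀ (l : List Int) (k : Nat),
    combosR l (k + 1) = (combosR l k).flatMap (fun p => extPairs p.1 p.2) := by
  intro l
  induction l with
  | nil => intro k; cases k <;> simp [combosR, extPairs]
  | cons x xs ih =>
    intro k
    cases k with
    | zero =>
      simp [combosR, extPairs, ih 0]
    | succ k =>
      simp only [combosR, List.flatMap_append, List.flatMap_map]
      rw [← ih (k+1)]
      congr 1
      rw [ih k, List.map_flatMap]
      simp [extPairs_cons]

-- Horner form of bitmask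
def bmN : List Int → Int
  | [] => 0
  | x :: t => PySem.Int.mod x 2 + 2 * bmN t

theorem enum_sum (xs : List Int) : ∀ s : Nat,
    ((PySem.List.enumerate xs (s : Int)).map (fun p => (PySem.Int.mod p.2 2) <<< p.1.toNat)).sum
      = 2 ^ s * bmN xs := by
  induction xs with
  | nil => intro s; simp [PySem.List.enumerate_nil, bmN]
  | cons x t ih =>
    intro s
    rw [PySem.List.enumerate_cons]
    have h1 : ((s : Int) + 1) = ((s + 1 : Nat) : Int) := by push_cast; ring
    rw [h1]
    simp only [List.map_cons, List.sum_cons, ih (s + 1), bmN]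
    have h2 : ((s : Int)).toNat = s := by simp
    rw [h2, Int.shiftLeft_natCast_right, Int.shiftLeft_eq]
    ring

theorem bitmask_eq_bmN (xs : List Int) : bitmask xs = bmN xs := by
  have := enum_sum xs 0
  simpa [bitmask, PySem.List.enumerate] using this

theorem maskB_aux (xs : List Int) : ∀ acc : Int,
    xs.reverse.foldl (fun m j => 2 * m + PySem.Int.mod j 2) acc = acc * 2 ^ xs.length + bmN xs := by
  induction xs with
  | nil => intro acc; simp [bmN]
  | cons x t ih =>
    intro acc
    simp only [List.reverse_cons, List.foldl_append, List.foldl_cons, List.foldl_nil, ih, bmN,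
      List.length_cons]
    ring

theorem maskB_eq_bmN (xs : List Int) : maskB xs = bmN xs := by
  simpa [maskB] using maskB_aux xs 0

-- one column of B, as a function of the button index
def colFn (bsets : List (List Int)) (machine_count : Int) (b : Int) : List Int :=
  (PySem.List.pyRange 0 machine_count 1).map
    (fun i => if i ∈ PySem.List.pyGetD bsets b [] then (1 : Int) else 0)

theorem addVec_joltageA (bsets : List (List Int)) (mc : Int) (c : List Int) (b : Int) :
    addVec (joltageA bsets mc c) (colFn bsets mc b) = joltageA bsets mc (c ++ [b]) := by
  simp [addVec, joltageA, colFn, List.zip_map', List.map_map, List.sum_append]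

-- B's layer items corresponding to a combination-with-rest
theorem extendRow_eq (bsets : List (List Int)) (mc : Int) (c : List Int) : ∀ r : List Int,
    extendRow (joltageA bsets mc c) (r.map (colFn bsets mc)) =
      (extPairs c r).map (fun p => (p.2.map (colFn bsets mc), joltageA bsets mc p.1)) := by
  intro r
  induction r with
  | nil => rfl
  | cons b r ih =>
    simp only [List.map_cons, extendRow, extPairs, ih, addVec_joltageA]

-- the two folds over range K agree: B's dict equals A's dict and B's layer is the
-- combinations-with-rest of size K, each carrying its accumulated joltage and column suffix
theorem fold_inv (bsets : List (List Int)) (mc : Int) (K : Nat) :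
    (List.range K).foldl
      (fun (st : PySem.Dict (List Int) (Int × Int) × List (List (List Int) × List Int)) clen =>
        let d := st.2.foldl (fun d item =>
          if !(d.contains item.2) then d.insert item.2 ((clen : Int), maskB item.2) else d) st.1
        let layer := st.2.flatMap (fun item => extendRow item.2 item.1)
        (d, layer))
      (PySem.Dict.empty,
        [(bsets.map (fun s => (PySem.List.pyRange 0 mc 1).map (fun i => if i ∈ s then (1 : Int) else 0)),
          (PySem.List.pyRange 0 mc 1).map (fun _ => (0 : Int)))])
    = ((List.range K).foldl (fun d clen =>
        (PySem.List.combinations (PySem.List.pyRange 0 (bsets.length : Int) 1) clen).foldl (fun d bcombo =>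
          let joltage := joltageA bsets mc bcombo
          if !(d.contains joltage) then d.insert joltage ((clen : Int), bitmask joltage) else d)
          d) PySem.Dict.empty,
       (combosR (PySem.List.pyRange 0 (bsets.length : Int) 1) K).map
         (fun p => (p.2.map (colFn bsets mc), joltageA bsets mc p.1))) := by
  induction K with
  | zero =>
    simp only [List.range_zero, List.foldl_nil, combosR, List.map_cons, List.map_nil]
    refine Prod.ext rfl ?_
    have hcols : (PySem.List.pyRange 0 (bsets.length : Int) 1).map (colFn bsets mc)
        = bsets.map (fun s => (PySem.List.pyRange 0 mc 1).map (fun i => if i ∈ s then (1 : Int) else 0)) := by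
      have hb : (PySem.List.pyRange 0 (bsets.length : Int) 1).map (fun j => PySem.List.pyGetD bsets j [])
          = bsets := PySem.List.map_pyGetD_pyRange_zero' bsets []
      calc (PySem.List.pyRange 0 (bsets.length : Int) 1).map (colFn bsets mc)
          = ((PySem.List.pyRange 0 (bsets.length : Int) 1).map (fun j => PySem.List.pyGetD bsets j [])).map
              (fun s => (PySem.List.pyRange 0 mc 1).map (fun i => if i ∈ s then (1 : Int) else 0)) := by
            rw [List.map_map]; rfl
        _ = _ := by rw [hb]
    have hzero : joltageA bsets mc [] = (PySem.List.pyRange 0 mc 1).map (fun _ => (0 : Int)) := by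
      simp [joltageA]
    simp [hcols, hzero]
  | succ K ih =>
    rw [List.range_succ]
    simp only [List.foldl_append, List.foldl_cons, List.foldl_nil, ih]
    refine Prod.ext ?_ ?_
    · show ((combosR _ K).map _).foldl _ _ = _
      rw [List.foldl_map, ← combosR_fst, List.foldl_map]
      apply PySem.List.foldl_congr_mem
      intro acc p _
      simp [maskB_eq_bmN, bitmask_eq_bmN]
    · show ((combosR _ K).map _).flatMap _ = _
      rw [List.flatMap_map, combosR_succ, List.map_flatMap]
      simp only [extendRow_eq]


theorem make_bcombos_spec' (bsets : List (List Int)) (mc : Int) :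
    make_bcombos bsets mc = make_bcombos_alt bsets mc := by
  simp only [make_bcombos, make_bcombos_alt, fold_inv]

-- ===== VERDICT (by name: the statement is the Claim_ definition above) =====
theorem make_bcombos_spec : Claim_equal_make_bcombos := by
  intro bsets mc _
  exact make_bcombos_spec' bsets mc
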